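-- pv_equiv track=rewrite | github.com/noorulameenkm/DataStructuresAlgorithms | DynamicProgramming/ribbonCut.py | ribbon_cut_tabulation
-- ===== SOURCE A (Python) =====
-- import math
--
-- def ribbon_cut_tabulation(lengths, total):
--     if total == 0:
--         return 0
--
--     n = len(lengths)
--     if n == 0:
--         return -1
--
--     dp = [[-math.inf for _ in range(total + 1)] for _ in range(n)]
--
--     for i in range(n):
--         dp[i][0] = 0
--
--     for i in range(n):
--         for j in range(1, total + 1):
--
--             if i > 0:
--                 dp[i][j] = dp[i - 1][j]
--
--             if lengths[i] <= j:
--                 if dp[i][j - lengths[i]] != -math.inf: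
--                     dp[i][j] = max(dp[i][j], 1 + dp[i][j - lengths[i]])
--
--     return -1 if dp[n - 1][total] == -math.inf else dp[n - 1][total]
-- ===== SOURCE B (Python) =====
-- def ribbon_cut_tabulation(lengths, total):
--     if total == 0:
--         return 0
--     if total < 0:
--         return -1
--     dp = [0] + [None] * total
--     for j in range(1, total + 1):
--         best = None
--         for l in lengths:
--             if 0 < l <= j and dp[j - l] is not None:
--                 c = dp[j - l] + 1
--                 if best is None or c > best:
--                     best = c
--         dp[j] = best
--     return -1 if dp[total] is None else dp[total]
-- ===== Notes on version B (the rewrite author's own statement) =====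
-- stated objective: simpler
-- what changed: Replaces the n x (total+1) 2D table filled item-by-item with a single 1D array filled with the target amount as the outer loop and the lengths scanned inside, using None instead of -math.inf and skipping non-positive lengths; negative totals return -1 directly.
-- outside the precondition, e.g. on ribbon_cut_tabulation([2, 0], 2): A returns 2, B returns 1
import Mathlib
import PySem

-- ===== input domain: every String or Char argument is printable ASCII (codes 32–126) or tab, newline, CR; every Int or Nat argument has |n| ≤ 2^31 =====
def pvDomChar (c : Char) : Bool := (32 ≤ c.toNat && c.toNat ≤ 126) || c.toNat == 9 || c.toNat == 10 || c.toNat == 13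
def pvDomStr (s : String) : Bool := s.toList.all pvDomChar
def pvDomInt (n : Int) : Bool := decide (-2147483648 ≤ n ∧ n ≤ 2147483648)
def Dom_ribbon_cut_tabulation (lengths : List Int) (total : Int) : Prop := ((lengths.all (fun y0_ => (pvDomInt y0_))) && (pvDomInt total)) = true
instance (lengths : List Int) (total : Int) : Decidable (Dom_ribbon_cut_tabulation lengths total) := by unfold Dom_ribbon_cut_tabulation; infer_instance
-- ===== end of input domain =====

-- B replaces A's n×(total+1) table (items outer) by one 1D pass with the target outer and the
-- lengths scanned inside; equivalence of the RETURN value is proved on Pre_ below.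
-- A cell value: none plays the role of Python's -math.inf, some v a finite count.

-- ===== PORT A =====

-- Python's max on cells where none is -inf
def pvPmax (a b : Option Int) : Option Int :=
  match a, b with
  | none, b => b
  | a, none => a
  | some x, some y => some (max x y)

-- dp[i][j] before the item update: previous row's value for i > 0, the -inf initialisation for i = 0
def pvBaseA (prev? : Option (List (Option Int))) (j : Nat) : Option Int :=
  match prev? with
  | some prev => prev.getD j none
  | none => none

-- one row of A's table: prev? = previous row (i > 0); j runs 1..T, cells appended left to right
def pvRowA (l : Int) (prev? : Option (List (Option Int))) (T : Nat) : List (Option Int) :=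
  (List.range' 1 T).foldl (fun cur j =>
    let base : Option Int := pvBaseA prev? j
    let cell : Option Int :=
      if l ≤ (j : Int) then
        match cur.getD (j - l.toNat) none with
        | some w => pvPmax base (some (1 + w))
        | none => base
      else base
    cur ++ [cell]) [some 0]

def ribbon_cut_tabulation (lengths : List Int) (total : Int) : Int :=
  if total = 0 then 0
  else
    match lengths with
    | [] => -1
    | l0 :: rest =>
      let T := total.toNat
      let lastRow := rest.foldl (fun prev l => pvRowA l (some prev) T) (pvRowA l0 none T)
      match lastRow.getD T none with
      | none => -1
      | some v => v

-- ===== PORT B =====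

-- the inner scan of Source B: best over the lengths of dp[j-l]+1 (none = Python's None)
def pvScanB (lengths : List Int) (dp : List (Option Int)) (j : Nat) : Option Int :=
  lengths.foldl (fun best l =>
    if 0 < l ∧ l ≤ (j : Int) then
      match dp.getD (j - l.toNat) none with
      | some r =>
        match best with
        | none => some (r + 1)
        | some b => if r + 1 > b then some (r + 1) else some b
      | none => best
    else best) none

def ribbon_cut_tabulation_alt (lengths : List Int) (total : Int) : Int :=
  if total = 0 then 0
  else if total < 0 then -1
  else
    let T := total.toNat
    let dp := (List.range' 1 T).foldl (fun dp j => dp ++ [pvScanB lengths dp j]) [some 0]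
    match dp.getD T none with
    | none => -1
    | some v => v

-- ===== PRECONDITION & SPEC =====
-- Pre_ excludes inputs on which A raises IndexError (negative total with non-empty lengths, or a
-- negative length with total ≥ 1) and, with total ≥ 1, lists containing a zero length: zero-length
-- pieces make the maximum unbounded, so A's finite count (one use of each zero per table row) and
-- B's (zeros ignored) are both arbitrary choices on an unspecified corner.
def Pre_ribbon_cut_tabulation (lengths : List Int) (total : Int) : Prop :=
  total = 0 ∨ lengths = [] ∨ (1 ≤ total ∧ ∀ l ∈ lengths, 1 ≤ l)
instance (lengths : List Int) (total : Int) : Decidable (Pre_ribbon_cut_tabulation lengths total) := by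
  unfold Pre_ribbon_cut_tabulation; infer_instance

def pvWitness_ribbon_cut_tabulation : List Int × Int := ([2, 3], 7)

def Spec_ribbon_cut_tabulation (lengths : List Int) (total : Int) (out : Int) : Prop := out = ribbon_cut_tabulation_alt lengths total
instance (lengths : List Int) (total : Int) (out : Int) : Decidable (Spec_ribbon_cut_tabulation lengths total out) := by unfold Spec_ribbon_cut_tabulation; infer_instance

-- ===== CLAIM (what is proved, stated in full; the proofs are below) =====
def Claim_equal_ribbon_cut_tabulation : Prop := ∀ (lengths : List Int) (total : Int), Dom_ribbon_cut_tabulation lengths total → Pre_ribbon_cut_tabulation lengths total → Spec_ribbon_cut_tabulation lengths total (ribbon_cut_tabulation lengths total)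

-- ===== LEMMAS AND PROOFS =====

-- order on cells (none = -inf)
def ple (a b : Option Int) : Prop :=
  match a, b with
  | none, _ => True
  | some _, none => False
  | some x, some y => x ≤ y

theorem ple_refl (a : Option Int) : ple a a := by cases a <;> simp [ple]

theorem ple_trans {a b c : Option Int} (h1 : ple a b) (h2 : ple b c) : ple a c := by
  cases a <;> cases b <;> cases c <;> simp_all [ple] <;> omega

theorem ple_antisymm {a b : Option Int} (h1 : ple a b) (h2 : ple b a) : a = b := by
  cases a <;> cases b <;> simp_all [ple] <;> omega

theorem ple_none (a : Option Int) : ple none a := by simp [ple]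

theorem pvPmax_none_right (a : Option Int) : pvPmax a none = a := by cases a <;> rfl

theorem ple_pvPmax_left (a b : Option Int) : ple a (pvPmax a b) := by
  cases a <;> cases b <;> simp [ple, pvPmax]

theorem ple_pvPmax_right (a b : Option Int) : ple b (pvPmax a b) := by
  cases a <;> cases b <;> simp [ple, pvPmax]

theorem pvPmax_ple {a b c : Option Int} (h1 : ple a c) (h2 : ple b c) : ple (pvPmax a b) c := by
  cases a <;> cases b <;> cases c <;> simp_all [ple, pvPmax] <;> omega

-- successor on cells
def pvSucc (a : Option Int) : Option Int := a.map (· + 1)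

theorem pvSucc_mono {a b : Option Int} (h : ple a b) : ple (pvSucc a) (pvSucc b) := by
  cases a <;> cases b <;> simp_all [ple, pvSucc] <;> omega

theorem pvSucc_pvPmax (a b : Option Int) : pvSucc (pvPmax a b) = pvPmax (pvSucc a) (pvSucc b) := by
  cases a <;> cases b <;> simp [pvSucc, pvPmax] <;> omega

-- B's recursion (value of dp[j] in Source B), item list fixed, target recursing
mutual
def pvF (q : List Int) : Nat → Option Int
  | 0 => some 0
  | (j+1) => pvFgo q q (j+1) none
termination_by j => (j, q.length + 2)

def pvFgo (q : List Int) : List Int → Nat → Option Int → Option Int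
  | [], _, b => b
  | l :: rest, j, b =>
    if h : 0 < l ∧ l ≤ (j : Int) then
      pvFgo q rest j
        (match pvF q (j - l.toNat) with
         | some r =>
           match b with
           | none => some (r + 1)
           | some bb => if r + 1 > bb then some (r + 1) else some bb
         | none => b)
    else pvFgo q rest j b
termination_by rem j _ => (j, rem.length + 1)
decreasing_by
  all_goals simp_wf
  all_goals first
    | exact Prod.Lex.left _ _ (by omega)
    | exact Prod.Lex.right _ (by omega)
end

theorem pvFgo_step (q : List Int) (j : Nat) (l : Int) (b : Option Int) :
    (match pvF q (j - l.toNat) with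
     | some r =>
       match b with
       | none => some (r + 1)
       | some bb => if r + 1 > bb then some (r + 1) else some bb
     | none => b) = pvPmax b (pvSucc (pvF q (j - l.toNat))) := by
  cases hF : pvF q (j - l.toNat) with
  | none => cases b <;> simp [pvSucc, pvPmax]
  | some r =>
    cases b with
    | none => simp [pvSucc, pvPmax]
    | some bb =>
      simp only [pvSucc, Option.map_some, pvPmax]
      split_ifs <;> simp <;> omega

theorem pvFgo_ge (q : List Int) : ∀ (rem : List Int) (j : Nat) (b : Option Int),
    ple b (pvFgo q rem j b) := by
  intro rem
  induction rem with
  | nil => intro j b; simp [pvFgo]; exact ple_refl b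
  | cons l rest ih =>
    intro j b
    rw [pvFgo]
    split
    · rw [pvFgo_step]
      exact ple_trans (ple_pvPmax_left _ _) (ih j _)
    · exact ih j b

theorem pvFgo_cand (q : List Int) : ∀ (rem : List Int) (j : Nat) (b : Option Int) (l : Int),
    l ∈ rem → (0 < l ∧ l ≤ (j : Int)) →
    ple (pvSucc (pvF q (j - l.toNat))) (pvFgo q rem j b) := by
  intro rem
  induction rem with
  | nil => intro j b l hmem; exact absurd hmem (List.not_mem_nil)
  | cons l0 rest ih =>
    intro j b l hmem hg
    rcases List.mem_cons.mp hmem with rfl | hmem'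
    · rw [pvFgo, dif_pos hg, pvFgo_step]
      exact ple_trans (ple_pvPmax_right _ _) (pvFgo_ge q rest j _)
    · rw [pvFgo]
      split
      · exact ih j _ l hmem' hg
      · exact ih j b l hmem' hg

-- each candidate is ≤ pvF
theorem pvF_cand (q : List Int) (j : Nat) (l : Int) (hmem : l ∈ q)
    (hg : 0 < l ∧ l ≤ (j : Int)) :
    ple (pvSucc (pvF q (j - l.toNat))) (pvF q j) := by
  match j with
  | 0 => exact absurd hg (by push_neg; intro h; omega)
  | (k+1) =>
    rw [pvF]
    exact pvFgo_cand q q (k+1) none l hmem hg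

theorem pvFgo_le (q : List Int) (X : Option Int) : ∀ (rem : List Int) (j : Nat) (b : Option Int),
    ple b X →
    (∀ l ∈ rem, (0 < l ∧ l ≤ (j : Int)) → ple (pvSucc (pvF q (j - l.toNat))) X) →
    ple (pvFgo q rem j b) X := by
  intro rem
  induction rem with
  | nil => intro j b hb _; simpa [pvFgo] using hb
  | cons l0 rest ih =>
    intro j b hb hcand
    rw [pvFgo]
    split
    · rename_i hg
      rw [pvFgo_step]
      refine ih j _ (pvPmax_ple hb ?_) ?_
      · exact hcand l0 (List.mem_cons_self) hg
      · intro l hl hgl; exact hcand l (List.mem_cons_of_mem _ hl) hgl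
    · exact ih j b hb (fun l hl hgl => hcand l (List.mem_cons_of_mem _ hl) hgl)

theorem pvF_le (q : List Int) (k : Nat) (X : Option Int)
    (hcand : ∀ l ∈ q, (0 < l ∧ l ≤ ((k : Int) + 1)) → ple (pvSucc (pvF q (k + 1 - l.toNat))) X) :
    ple (pvF q (k+1)) X := by
  rw [pvF]
  refine pvFgo_le q X q (k+1) none (ple_none X) ?_
  intro l hl hg
  exact hcand l hl (by push_cast at hg ⊢; omega)

-- monotone in the item list
theorem pvF_mono_sub (q q' : List Int) (hsub : ∀ x ∈ q, x ∈ q') :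
    ∀ j, ple (pvF q j) (pvF q' j) := by
  intro j
  induction j using Nat.strong_induction_on with
  | _ j ih =>
    match j with
    | 0 => simp [pvF]; exact ple_refl _
    | (k+1) =>
      refine pvF_le q k _ ?_
      intro l hl hg
      refine ple_trans (pvSucc_mono (ih (k + 1 - l.toNat) (by omega))) ?_
      exact pvF_cand q' (k+1) l (hsub l hl) (by push_cast at hg ⊢; omega)

-- the exchange lemma: appending one item to the item list
theorem pvF_append (q : List Int) (l : Int) (hl : 1 ≤ l) :
    ∀ j, pvF (q ++ [l]) j =
      pvPmax (pvF q j)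
        (if l ≤ (j : Int) then pvSucc (pvF (q ++ [l]) (j - l.toNat)) else none) := by
  intro j
  induction j using Nat.strong_induction_on with
  | _ j ih =>
    match j with
    | 0 =>
      rw [if_neg (by push_cast; omega)]
      simp [pvF, pvPmax]
    | (k+1) =>
      apply ple_antisymm
      · -- ≤ : every candidate of pvF (q++[l]) (k+1) is below the RHS
        refine pvF_le (q ++ [l]) k _ ?_
        intro l' hl' hg
        rcases List.mem_append.mp hl' with hq | hsing
        · -- l' ∈ q
          have hm : k + 1 - l'.toNat < k + 1 := by omega
          rw [ih (k + 1 - l'.toNat) hm, pvSucc_pvPmax]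
          refine pvPmax_ple ?_ ?_
          · refine ple_trans (pvF_cand q (k+1) l' hq (by push_cast at hg ⊢; omega)) ?_
            exact ple_pvPmax_left _ _
          · by_cases hcase : l ≤ ((k + 1 - l'.toNat : Nat) : Int)
            · rw [if_pos hcase]
              have hlk : l ≤ ((k+1 : Nat) : Int) := by push_cast at hcase ⊢; omega
              rw [if_pos hlk]
              refine ple_trans ?_ (ple_pvPmax_right _ _)
              refine pvSucc_mono ?_
              have harith : k + 1 - l'.toNat - l.toNat = k + 1 - l.toNat - l'.toNat := by omega
              rw [harith]
              refine pvF_cand (q ++ [l]) (k + 1 - l.toNat) l'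
                (List.mem_append.mpr (Or.inl hq)) ?_
              constructor
              · exact hg.1
              · push_cast at hcase hg ⊢; omega
            · rw [if_neg hcase]
              simp [pvSucc, ple]
        · -- l' = l
          have heq : l' = l := by simpa using hsing
          rw [heq] at hg ⊢
          obtain ⟨hg1, hg2⟩ := hg
          rw [if_pos (show l ≤ ((k+1 : Nat) : Int) by push_cast; omega)]
          exact ple_pvPmax_right _ _
      · -- ≥ : both components are below pvF (q++[l]) (k+1)
        refine pvPmax_ple ?_ ?_
        · exact pvF_mono_sub q (q ++ [l]) (fun x hx => List.mem_append.mpr (Or.inl hx)) (k+1)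
        · by_cases hcase : l ≤ ((k+1 : Nat) : Int)
          · rw [if_pos hcase]
            exact pvF_cand (q ++ [l]) (k+1) l (List.mem_append.mpr (Or.inr (by simp)))
              ⟨by omega, hcase⟩
          · rw [if_neg hcase]; exact ple_none _

-- A's cell recursion: pvR (reversed processed items) j = A's dp value at column j
def pvR : List Int → Nat → Option Int
  | _, 0 => some 0
  | [], _+1 => none
  | l :: p, j+1 =>
    let base := pvR p (j+1)
    if h : 0 < l ∧ l ≤ ((j : Int) + 1) then
      match pvR (l :: p) (j + 1 - l.toNat) with
      | some w => pvPmax base (some (w + 1))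
      | none => base
    else base
termination_by p j => (p.length, j)
decreasing_by
  all_goals simp_wf
  all_goals first
    | exact Prod.Lex.left _ _ (by omega)
    | exact Prod.Lex.right _ (by omega)

theorem pvF_nil (j : Nat) : pvF [] (j+1) = none := by rw [pvF, pvFgo]

-- A's recursion equals B's recursion (items all ≥ 1)
theorem pvR_eq_pvF (q : List Int) (hq : ∀ x ∈ q, 1 ≤ x) :
    ∀ j, pvR q.reverse j = pvF q j := by
  induction q using List.reverseRecOn with
  | nil =>
    intro j
    match j with
    | 0 => rw [pvR, pvF]
    | (k+1) => rw [List.reverse_nil, pvR, pvF_nil]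
  | append_singleton q l ih =>
    have hl : 1 ≤ l := hq l (List.mem_append.mpr (Or.inr (by simp)))
    have hq' : ∀ x ∈ q, 1 ≤ x := fun x hx => hq x (List.mem_append.mpr (Or.inl hx))
    have ihq := ih hq'
    intro j
    induction j using Nat.strong_induction_on with
    | _ j sih =>
      match j with
      | 0 => rw [pvR, pvF]
      | (k+1) =>
        rw [List.reverse_append, List.reverse_singleton, List.singleton_append, pvR,
          pvF_append q l hl (k+1)]
        by_cases hcase : l ≤ ((k+1 : Nat) : Int)
        · have hg : 0 < l ∧ l ≤ ((k : Int) + 1) := ⟨by omega, by push_cast at hcase ⊢; omega⟩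
          rw [dif_pos hg, if_pos hcase]
          have hrec : pvR (l :: q.reverse) (k + 1 - l.toNat) = pvF (q ++ [l]) (k + 1 - l.toNat) := by
            have := sih (k + 1 - l.toNat) (by omega)
            rwa [List.reverse_append, List.reverse_singleton, List.singleton_append] at this
          rw [hrec, ihq (k+1)]
          cases pvF (q ++ [l]) (k + 1 - l.toNat) with
          | none => simp [pvSucc, pvPmax_none_right]
          | some w => simp [pvSucc]
        · have hg : ¬ (0 < l ∧ l ≤ ((k : Int) + 1)) := by push_cast at hcase ⊢; omega
          rw [dif_neg hg, if_neg hcase, pvPmax_none_right]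
          exact ihq (k+1)

-- getD on a mapped range
theorem getD_map_range (f : Nat → Option Int) (n j : Nat) (h : j < n) :
    ((List.range n).map f).getD j none = f j := by
  rw [List.getD_eq_getElem?_getD, List.getElem?_map, List.getElem?_range h]
  rfl

-- equation lemmas for pvR
theorem pvR_zero (p : List Int) : pvR p 0 = some 0 := by rw [pvR]

theorem pvR_cons_succ (l : Int) (p : List Int) (j : Nat) :
    pvR (l :: p) (j+1) =
      (if 0 < l ∧ l ≤ ((j : Int) + 1) then
        match pvR (l :: p) (j + 1 - l.toNat) with
        | some w => pvPmax (pvR p (j+1)) (some (w + 1))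
        | none => pvR p (j+1)
      else pvR p (j+1)) := by
  rw [pvR]
  simp only [dite_eq_ite]

-- one row of A's table computes pvR (l :: p)
theorem pvRowA_eq (l : Int) (hl : 1 ≤ l) (p : List Int) (prev? : Option (List (Option Int)))
    (T : Nat)
    (hprev : prev? = none ∧ p = [] ∨ prev? = some ((List.range (T+1)).map (pvR p))) :
    pvRowA l prev? T = (List.range (T+1)).map (pvR (l :: p)) := by
  have hB : ∀ j : Nat, 1 ≤ j → j < T + 1 → pvBaseA prev? j = pvR p j := by
    intro j hj1 hj2
    rcases hprev with ⟨h1, h2⟩ | h1 <;> subst h1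
    · subst h2
      obtain ⟨m, rfl⟩ : ∃ m, j = m + 1 := ⟨j - 1, by omega⟩
      rw [pvBaseA, pvR]
    · rw [pvBaseA]
      exact getD_map_range _ _ _ hj2
  have aux : ∀ k, k ≤ T →
      (List.range' 1 k).foldl (fun cur j =>
        let base : Option Int := pvBaseA prev? j
        let cell : Option Int :=
          if l ≤ (j : Int) then
            match cur.getD (j - l.toNat) none with
            | some w => pvPmax base (some (1 + w))
            | none => base
          else base
        cur ++ [cell]) [some 0] = (List.range (k+1)).map (pvR (l :: p)) := by
    intro k
    induction k with
    | zero => intro _; simp [List.range'_zero, List.range_succ, pvR_zero]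
    | succ k ihk =>
      intro hkT
      rw [List.range'_concat, one_mul, List.foldl_append, ihk (by omega)]
      simp only [List.foldl_cons, List.foldl_nil]
      rw [hB (1 + k) (by omega) (by omega)]
      rw [Nat.add_comm 1 k]
      rw [getD_map_range (pvR (l :: p)) (k+1) (k + 1 - l.toNat) (by omega)]
      rw [List.range_succ (n := k+1), List.map_append]
      congr 1
      simp only [List.map_cons, List.map_nil]
      congr 1
      rw [pvR_cons_succ]
      by_cases hc : l ≤ ((k+1 : Nat) : Int)
      · rw [if_pos hc, if_pos (show 0 < l ∧ l ≤ ((k : Int) + 1) by push_cast at hc ⊢; omega)]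
        cases pvR (l :: p) (k + 1 - l.toNat) with
        | none => rfl
        | some w => simp [Int.add_comm 1 w]
      · rw [if_neg hc, if_neg (show ¬ (0 < l ∧ l ≤ ((k : Int) + 1)) by push_cast at hc ⊢; omega)]
  rw [pvRowA]
  exact aux T (le_refl T)

-- folding the remaining items row by row
theorem foldRows (T : Nat) : ∀ (rest : List Int) (pR : List Int),
    (∀ x ∈ rest, 1 ≤ x) →
    rest.foldl (fun prev l => pvRowA l (some prev) T) ((List.range (T+1)).map (pvR pR)) =
      (List.range (T+1)).map (pvR (rest.reverse ++ pR)) := by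
  intro rest
  induction rest with
  | nil => intro pR _; simp
  | cons l rest ih =>
    intro pR hall
    have hl : 1 ≤ l := hall l (List.mem_cons_self)
    rw [List.foldl_cons,
      pvRowA_eq l hl pR (some ((List.range (T+1)).map (pvR pR))) T (Or.inr rfl),
      ih (l :: pR) (fun x hx => hall x (List.mem_cons_of_mem _ hx))]
    simp

-- B's dp array holds pvF values
theorem pvScanB_eq (q : List Int) (k : Nat) :
    pvScanB q ((List.range (k+1)).map (pvF q)) (k+1) = pvF q (k+1) := by
  rw [pvF, pvScanB]
  have aux : ∀ (rem : List Int) (b : Option Int),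
      rem.foldl (fun best l =>
        if 0 < l ∧ l ≤ ((k+1 : Nat) : Int) then
          match ((List.range (k+1)).map (pvF q)).getD (k + 1 - l.toNat) none with
          | some r =>
            match best with
            | none => some (r + 1)
            | some b => if r + 1 > b then some (r + 1) else some b
          | none => best
        else best) b = pvFgo q rem (k+1) b := by
    intro rem
    induction rem with
    | nil => intro b; rw [List.foldl_nil, pvFgo]
    | cons l rest ih =>
      intro b
      rw [List.foldl_cons, pvFgo]
      by_cases hg : 0 < l ∧ l ≤ ((k+1 : Nat) : Int)
      · rw [if_pos hg, dif_pos hg]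
        have hidx : k + 1 - l.toNat < k + 1 := by
          have := hg.1; have := hg.2; push_cast at *; omega
        rw [getD_map_range _ _ _ hidx]
        exact ih _
      · rw [if_neg hg, dif_neg hg]
        exact ih b
  exact aux q none

theorem pvDpB (q : List Int) : ∀ (k : Nat),
    (List.range' 1 k).foldl (fun dp j => dp ++ [pvScanB q dp j]) [some 0] =
      (List.range (k+1)).map (pvF q) := by
  intro k
  induction k with
  | zero => simp [List.range'_zero, List.range_succ, List.range_zero, pvF]
  | succ k ihk =>
    rw [List.range'_concat, one_mul, List.foldl_append, ihk]
    simp only [List.foldl_cons, List.foldl_nil]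
    have h1k : 1 + k = k + 1 := by omega
    rw [h1k, pvScanB_eq q k, List.range_succ (n := k+1), List.map_append]
    rfl

-- ===== VERDICT (by name: the statement is the Claim_ definition above) =====
theorem ribbon_cut_tabulation_spec : Claim_equal_ribbon_cut_tabulation := by
  intro lengths total _ hpre
  unfold Spec_ribbon_cut_tabulation
  by_cases h0 : total = 0
  · subst h0; rfl
  · by_cases hnil : lengths = []
    · subst hnil
      rw [ribbon_cut_tabulation, if_neg h0]
      rw [ribbon_cut_tabulation_alt, if_neg h0]
      by_cases hneg : total < 0
      · rw [if_pos hneg]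
      · rw [if_neg hneg]
        have hT : total.toNat = (total.toNat - 1) + 1 := by omega
        simp only [pvDpB]
        rw [getD_map_range _ _ _ (by omega), hT, pvF_nil]
    · rcases hpre with h | h | ⟨htot, hall⟩
      · exact absurd h h0
      · exact absurd h hnil
      · have hneg : ¬ total < 0 := by omega
        obtain ⟨l0, rest, rfl⟩ : ∃ l0 rest, lengths = l0 :: rest := by
          cases lengths with
          | nil => exact absurd rfl hnil
          | cons a b => exact ⟨a, b, rfl⟩
        rw [ribbon_cut_tabulation, if_neg h0]
        rw [ribbon_cut_tabulation_alt, if_neg h0, if_neg hneg]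
        simp only [pvDpB]
        have hl0 : 1 ≤ l0 := hall l0 (List.mem_cons_self)
        have hrest : ∀ x ∈ rest, 1 ≤ x := fun x hx => hall x (List.mem_cons_of_mem _ hx)
        rw [pvRowA_eq l0 hl0 [] none total.toNat (Or.inl ⟨rfl, rfl⟩),
          foldRows total.toNat rest [l0] hrest]
        have hrev : rest.reverse ++ [l0] = (l0 :: rest).reverse := by simp
        rw [hrev,
          getD_map_range _ _ _ (by omega), getD_map_range _ _ _ (by omega),
          pvR_eq_pvF (l0 :: rest) hall total.toNat]
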